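-- pv_equiv track=rewrite | github.com/munabhusal/Dynamic-Programming | SumwithNumbers/howsum.py | howsum_wdp_tabular
-- ===== SOURCE A (Python) =====
-- def howsum_wdp_tabular(target, list):
--     table = [None] * (target+1)
--     table[0] =  []
--
--     for i in range(len(table)):
--         if table[i]!= None:
--             for j in list:
--                 if(i+j <= target):
--                     table[i+j]= table[i] + [j]
--
--     return table[target]
-- ===== SOURCE B (Python) =====
-- def howsum_wdp_tabular(target, list):
--     # Append-only write log instead of A's table of copied combination lists:
--     # each write records (source cell, version of the source at write time, step);
--     # the answer is reconstructed by one backward walk through the versions.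
--     log = [[] for _ in range(target + 1)]
--     log[0].append(None)  # version 1 of cell 0 is the empty combination
--     for i in range(target + 1):
--         if log[i]:
--             for j in list:
--                 if i + j <= target:
--                     log[i + j].append((i, len(log[i]), j))
--     if not log[target]:
--         return None
--     path = []
--     k, v = target, len(log[target])
--     while True:
--         e = log[k][v - 1]
--         if e is None:
--             break
--         i, vi, j = e
--         path.append(j)
--         k, v = i, vi
--     path.reverse()
--     return path
-- ===== Notes on version B (the rewrite author's own statement) =====
-- stated objective: alternative
-- what changed: B replaces A's table of fully copied combination lists (table[i+j] = table[i] + [j]) by an append-only write log that records (source cell, source version, step) per write, and reconstructs the single requested combination by one backward walk through the recorded versions.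
import Mathlib
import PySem

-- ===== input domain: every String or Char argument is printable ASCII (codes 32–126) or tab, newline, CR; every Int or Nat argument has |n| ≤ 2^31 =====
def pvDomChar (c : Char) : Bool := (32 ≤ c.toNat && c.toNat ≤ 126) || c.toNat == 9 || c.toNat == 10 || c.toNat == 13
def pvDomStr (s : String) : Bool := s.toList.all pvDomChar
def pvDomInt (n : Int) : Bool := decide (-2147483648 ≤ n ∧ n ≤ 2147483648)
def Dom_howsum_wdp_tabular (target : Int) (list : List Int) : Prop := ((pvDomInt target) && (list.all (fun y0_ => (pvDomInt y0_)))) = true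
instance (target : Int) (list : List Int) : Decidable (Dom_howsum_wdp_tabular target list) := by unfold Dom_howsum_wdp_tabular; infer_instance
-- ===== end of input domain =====

-- B replaces A's table of fully copied combination lists by an append-only write log
-- (each write records source cell, source version and step) and reconstructs the one
-- needed combination by a single backward walk through the recorded versions.

-- ===== PORT A =====
-- physical index of Python's xs[i] for -len <= i < len (negative indices wrap)
def pvPhys (n : Nat) (i : Int) : Nat := (if 0 ≤ i then i else i + n).toNat

-- xs[i] with a default: exact Python list indexing for in-range i (where Python would
-- raise IndexError — outside Pre_ — the default is returned); Array mirrors Python list indexing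
def pvAGet {α : Type} (xs : Array α) (i : Int) (d : α) : α :=
  if -(xs.size : Int) ≤ i ∧ i < (xs.size : Int) then xs.getD (pvPhys xs.size i) d else d

-- xs[i] = v: exact Python list assignment for in-range i (where Python would raise
-- IndexError — outside Pre_ — the array is returned unchanged)
def pvASet {α : Type} (xs : Array α) (i : Int) (v : α) : Array α :=
  if -(xs.size : Int) ≤ i ∧ i < (xs.size : Int) then xs.setIfInBounds (pvPhys xs.size i) v
  else xs

-- inner loop body: 'if i+j <= target: table[i+j] = table[i] + [j]'
def pvInnerA (target : Int) (i : Nat) (table : Array (Option (List Int))) (j : Int) :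
    Array (Option (List Int)) :=
  if (i : Int) + j ≤ target then
    pvASet table ((i : Int) + j) (some ((pvAGet table (i : Int) none).getD [] ++ [j]))
  else table

-- outer loop body: 'if table[i] != None: for j in list: …'
def pvOuterA (target : Int) (list : List Int) (table : Array (Option (List Int))) (i : Nat) :
    Array (Option (List Int)) :=
  if (pvAGet table (i : Int) none).isSome then list.foldl (pvInnerA target i) table
  else table

def howsum_wdp_tabular (target : Int) (list : List Int) : Option (List Int) :=
  if target + 1 ≤ 0 then none  -- Python raises IndexError at 'table[0] = []' (outside Pre_)
  else
    pvAGet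
      ((List.range (target + 1).toNat).foldl (pvOuterA target list)
        (pvASet (Array.replicate (target + 1).toNat (none : Option (List Int))) 0 (some [])))
      target none

-- ===== PORT B =====
-- a log entry: none = the initial marker of cell 0; some (i, vi, j) = 'written from
-- version vi of cell i with step j'
-- inner loop body: 'if i+j <= target: log[i+j].append((i, len(log[i]), j))'
def pvInnerB (target : Int) (i : Nat) (log : Array (List (Option (Nat × Nat × Int))))
    (j : Int) : Array (List (Option (Nat × Nat × Int))) :=
  if (i : Int) + j ≤ target then
    pvASet log ((i : Int) + j)
      (pvAGet log ((i : Int) + j) [] ++ [some (i, (pvAGet log (i : Int) []).length, j)])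
  else log

-- outer loop body: 'if log[i]: for j in list: …'
def pvOuterB (target : Int) (list : List Int) (log : Array (List (Option (Nat × Nat × Int))))
    (i : Nat) : Array (List (Option (Nat × Nat × Int))) :=
  if (pvAGet log (i : Int) []).isEmpty then log
  else list.foldl (pvInnerB target i) log

-- the write log after the sweep
def pvLog (target : Int) (list : List Int) : Array (List (Option (Nat × Nat × Int))) :=
  (List.range (target + 1).toNat).foldl (pvOuterB target list)
    (pvASet (Array.replicate (target + 1).toNat ([] : List (Option (Nat × Nat × Int)))) 0
      [none])

-- the backward walk 'while True: e = log[k][v-1]; …' collecting the steps (target side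
-- first, reversed by the caller); the fuel only makes it total — the caller passes the
-- total number of log entries, which the proof shows always suffices inside Pre_
def pvBuildA (log : Array (List (Option (Nat × Nat × Int)))) :
    Nat → Nat → Nat → List Int → List Int
  | 0, _, _, path => path
  | fuel + 1, k, v, path =>
    match (log.getD k [])[v - 1]? with
    | none => path
    | some none => path
    | some (some (i, vi, j)) => pvBuildA log fuel i vi (path ++ [j])

def howsum_wdp_tabular_alt (target : Int) (list : List Int) : Option (List Int) :=
  if target + 1 ≤ 0 then none  -- Python raises IndexError at 'log[0].append(None)' (outside Pre_)
  else
    if (pvAGet (pvLog target list) target []).isEmpty then none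
    else
      some
        ((pvBuildA (pvLog target list)
          ((pvLog target list).foldl (fun a c => a + c.length) 0)
          target.toNat (pvAGet (pvLog target list) target []).length []).reverse)

-- ===== PRECONDITION & SPEC =====
-- Pre_ is exactly the set of inputs on which Python A returns normally: A raises
-- IndexError when target < 0 (at 'table[0] = []') and when some step j < -(target+1)
-- (the write 'table[i+j] = …' at i = 0 then indexes below -len(table)).
def Pre_howsum_wdp_tabular (target : Int) (list : List Int) : Prop :=
  0 ≤ target ∧ ∀ j ∈ list, -(target + 1) ≤ j
instance (target : Int) (list : List Int) : Decidable (Pre_howsum_wdp_tabular target list) := by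
  unfold Pre_howsum_wdp_tabular; infer_instance

def pvWitness_howsum_wdp_tabular : Int × List Int := (7, [2, 3])

def Spec_howsum_wdp_tabular (target : Int) (list : List Int) (out : Option (List Int)) : Prop := out = howsum_wdp_tabular_alt target list
instance (target : Int) (list : List Int) (out : Option (List Int)) : Decidable (Spec_howsum_wdp_tabular target list out) := by unfold Spec_howsum_wdp_tabular; infer_instance

-- ===== CLAIM (what is proved, stated in full; the proofs are below) =====
def Claim_equal_howsum_wdp_tabular : Prop := ∀ (target : Int) (list : List Int), Dom_howsum_wdp_tabular target list → Pre_howsum_wdp_tabular target list → Spec_howsum_wdp_tabular target list (howsum_wdp_tabular target list)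

-- ===== LEMMAS AND PROOFS =====

theorem pvPhys_lt (n : Nat) (i : Int) (h1 : -(n : Int) ≤ i) (h2 : i < (n : Int)) :
    pvPhys n i < n := by
  simp only [pvPhys]; split_ifs <;> omega

theorem pvPhys_natCast (n i : Nat) : pvPhys n (i : Int) = i := by
  simp [pvPhys]

theorem pvGetD_set_self {α : Type} (xs : List α) (m : Nat) (v d : α) (h : m < xs.length) :
    (xs.set m v).getD m d = v := by
  simp [List.getD, h]

theorem pvGetD_set_ne {α : Type} (xs : List α) (m k : Nat) (v d : α) (h : m ≠ k) :
    (xs.set m v).getD k d = xs.getD k d := by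
  simp [List.getD, h]

theorem pvGetD_replicate {α : Type} (n k : Nat) (v d : α) :
    (List.replicate n v).getD k d = if k < n then v else d := by
  simp [List.getD, List.getElem?_replicate]; split_ifs <;> rfl

-- bridges from the Array primitives to their List counterparts
theorem pvArrGetD_toList {α : Type} (xs : Array α) (n : Nat) (d : α) :
    xs.getD n d = xs.toList.getD n d := by
  simp only [Array.getD, List.getD]
  split_ifs with h
  · simp [h]
  · rw [List.getElem?_eq_none (by simpa using h)]; rfl

theorem pvAGet_eq {α : Type} (xs : Array α) (i : Int) (d : α)
    (h1 : -(xs.toList.length : Int) ≤ i) (h2 : i < (xs.toList.length : Int)) :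
    pvAGet xs i d = xs.toList.getD (pvPhys xs.toList.length i) d := by
  rw [pvAGet, if_pos (by constructor <;> simpa [Array.length_toList] using ‹_›),
    pvArrGetD_toList]
  congr 1

theorem pvAGet_natCast {α : Type} (xs : Array α) (i : Nat) (d : α)
    (h : i < xs.toList.length) : pvAGet xs (i : Int) d = xs.toList.getD i d := by
  rw [pvAGet_eq _ _ _ (by omega) (by omega), pvPhys_natCast]

theorem pvAGet_of_nonneg {α : Type} (xs : Array α) (i : Int) (d : α) (h0 : 0 ≤ i)
    (h : i.toNat < xs.toList.length) : pvAGet xs i d = xs.toList.getD i.toNat d := by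
  obtain ⟨n, rfl⟩ : ∃ n : Nat, i = (n : Int) := ⟨i.toNat, (Int.toNat_of_nonneg h0).symm⟩
  rw [pvAGet_natCast _ _ _ (by simpa using h), Int.toNat_natCast]

theorem pvASet_toList {α : Type} (xs : Array α) (i : Int) (v : α)
    (h1 : -(xs.toList.length : Int) ≤ i) (h2 : i < (xs.toList.length : Int)) :
    (pvASet xs i v).toList = xs.toList.set (pvPhys xs.toList.length i) v := by
  rw [pvASet, if_pos (by constructor <;> simpa [Array.length_toList] using ‹_›),
    Array.toList_setIfInBounds]
  congr 2

-- the List-level walk the proof reasons about, and its bridge to the Array port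
def pvBuild (log : List (List (Option (Nat × Nat × Int)))) :
    Nat → Nat → Nat → Option (List Int)
  | 0, _, _ => none
  | fuel + 1, k, v =>
    match (log.getD k [])[v - 1]? with
    | none => none
    | some none => some []
    | some (some (i, vi, j)) => (pvBuild log fuel i vi).map (fun r => j :: r)

theorem pvBuildA_eq (log : Array (List (Option (Nat × Nat × Int)))) :
    ∀ (f k v : Nat) (path r : List Int), pvBuild log.toList f k v = some r →
      pvBuildA log f k v path = path ++ r := by
  intro f
  induction f with
  | zero => intro k v path r h; simp [pvBuild] at h
  | succ f ih =>
    intro k v path r h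
    rw [pvBuild] at h
    rw [pvBuildA, pvArrGetD_toList]
    cases hread : (log.toList.getD k [])[v - 1]? with
    | none => rw [hread] at h; simp at h
    | some e =>
      rw [hread] at h
      cases e with
      | none => simp at h; simp [← h]
      | some t =>
        obtain ⟨i, vi, j⟩ := t
        simp only [Option.map_eq_some_iff] at h
        obtain ⟨r', hr', rfl⟩ := h
        simp only [ih i vi (path ++ [j]) r' hr']
        simp

theorem pvFoldLen {α : Type} : ∀ (l : List (List α)) (a : Nat),
    l.foldl (fun a c => a + c.length) a = a + (l.map List.length).sum := by
  intro l
  induction l with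
  | nil => intro a; simp
  | cons x xs ih =>
    intro a
    simp only [List.foldl_cons, List.map_cons, List.sum_cons, ih]
    omega

theorem pvFuel_eq {α : Type} (log : Array (List α)) :
    log.foldl (fun a c => a + c.length) 0 = (log.toList.map List.length).sum := by
  rw [← Array.foldl_toList, pvFoldLen]
  omega

-- well-formed log: every recorded pointer refers to an existing version
abbrev pvWF (n : Nat) (log : List (List (Option (Nat × Nat × Int)))) : Prop :=
  ∀ (k p i vi : Nat) (j : Int), (log.getD k [])[p]? = some (some (i, vi, j)) →
    i < n ∧ 1 ≤ vi ∧ vi ≤ (log.getD i []).length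

-- the joint invariant of the two sweeps: every filled cell of A's table holds the
-- reverse of what B's backward walk reconstructs from the current log
def pvInv (target : Int) (table : Array (Option (List Int)))
    (log : Array (List (Option (Nat × Nat × Int)))) : Prop :=
  table.toList.length = (target + 1).toNat ∧ log.toList.length = (target + 1).toNat ∧
  pvWF (target + 1).toNat log.toList ∧
  ∀ k, k < (target + 1).toNat →
    (table.toList.getD k none = none ∧ log.toList.getD k [] = []) ∨
    (∃ r, pvBuild log.toList ((log.toList.map List.length).sum) k
        (log.toList.getD k []).length = some r ∧
      table.toList.getD k none = some r.reverse)

theorem pvBuild_nonempty {log : List (List (Option (Nat × Nat × Int)))} {f k v : Nat}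
    {r : List Int} (h : pvBuild log f k v = some r) : log.getD k [] ≠ [] := by
  intro hemp
  cases f with
  | zero => simp [pvBuild] at h
  | succ f => rw [pvBuild, hemp] at h; simp at h

theorem pvBuild_mono (log : List (List (Option (Nat × Nat × Int)))) :
    ∀ (f f' k v : Nat) (r : List Int), f ≤ f' → pvBuild log f k v = some r →
      pvBuild log f' k v = some r := by
  intro f
  induction f with
  | zero => intro f' k v r _ h; simp [pvBuild] at h
  | succ f ih =>
    intro f' k v r hff h
    obtain ⟨f'', rfl⟩ : ∃ f'', f' = f'' + 1 := ⟨f' - 1, by omega⟩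
    rw [pvBuild] at h ⊢
    cases hread : (log.getD k [])[v - 1]? with
    | none => rw [hread] at h; simp at h
    | some e =>
      rw [hread] at h
      cases e with
      | none => exact h
      | some t =>
        obtain ⟨i, vi, j⟩ := t
        simp only [Option.map_eq_some_iff] at h
        obtain ⟨r', hr', rfl⟩ := h
        simp only [Option.map_eq_some_iff]
        exact ⟨r', ih f'' i vi r' (by omega) hr', rfl⟩

-- appending an entry at the end of any cell does not change walks through old versions
theorem pvBuild_set_append {n : Nat} (log : List (List (Option (Nat × Nat × Int))))
    (m : Nat) (e : Option (Nat × Nat × Int)) (hm : m < log.length) (hWF : pvWF n log) :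
    ∀ (f k v : Nat), 1 ≤ v → v ≤ (log.getD k []).length →
      pvBuild (log.set m (log.getD m [] ++ [e])) f k v = pvBuild log f k v := by
  intro f
  induction f with
  | zero => intro k v _ _; rfl
  | succ f ih =>
    intro k v hv1 hv2
    have hread : ((log.set m (log.getD m [] ++ [e])).getD k [])[v - 1]? =
        (log.getD k [])[v - 1]? := by
      by_cases hkm : k = m
      · subst hkm
        rw [pvGetD_set_self _ _ _ _ hm, List.getElem?_append_left (by omega)]
      · rw [pvGetD_set_ne _ _ _ _ _ (fun h => hkm h.symm)]
    rw [pvBuild, pvBuild, hread]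
    cases hr : (log.getD k [])[v - 1]? with
    | none => rfl
    | some e' =>
      cases e' with
      | none => rfl
      | some t =>
        obtain ⟨i, vi, j⟩ := t
        obtain ⟨_, hvi1, hvi2⟩ := hWF k (v - 1) i vi j hr
        simp only [ih i vi hvi1 hvi2]

theorem pvSumLen_set_append {β : Type} :
    ∀ (log : List (List β)) (m : Nat) (e : β), m < log.length →
      ((log.set m (log.getD m [] ++ [e])).map List.length).sum =
        (log.map List.length).sum + 1 := by
  intro log
  induction log with
  | nil => intro m e h; simp at h
  | cons x xs ih =>
    intro m e h
    cases m with
    | zero => simp [List.getD]; omega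
    | succ m =>
      have := ih m e (by simpa using h)
      simp only [List.set_cons_succ, List.map_cons, List.sum_cons]
      have hg : (x :: xs).getD (m + 1) [] = xs.getD m [] := by simp [List.getD]
      rw [hg, this]
      omega

theorem pvLen_getD_le_set_append (log : List (List (Option (Nat × Nat × Int))))
    (m : Nat) (e : Option (Nat × Nat × Int)) (k : Nat) (hm : m < log.length) :
    (log.getD k []).length ≤ ((log.set m (log.getD m [] ++ [e])).getD k []).length := by
  by_cases hkm : k = m
  · subst hkm; rw [pvGetD_set_self _ _ _ _ hm]; simp
  · rw [pvGetD_set_ne _ _ _ _ _ (fun h => hkm h.symm)]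

theorem pvWF_set_append {n : Nat} (log : List (List (Option (Nat × Nat × Int))))
    (hWF : pvWF n log) (m : Nat) (hm : m < log.length) (i vi : Nat) (j : Int)
    (hi : i < n) (hvi1 : 1 ≤ vi) (hvi : vi ≤ (log.getD i []).length) :
    pvWF n (log.set m (log.getD m [] ++ [some (i, vi, j)])) := by
  intro k p i' vi' j' hread
  have hgrow := pvLen_getD_le_set_append log m (some (i, vi, j)) i' hm
  by_cases hkm : k = m
  · subst hkm
    rw [pvGetD_set_self _ _ _ _ hm] at hread
    rcases Nat.lt_or_ge p (log.getD k []).length with hp | hp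
    · rw [List.getElem?_append_left hp] at hread
      obtain ⟨a, b, c⟩ := hWF k p i' vi' j' hread
      exact ⟨a, b, le_trans c hgrow⟩
    · rcases Nat.eq_or_lt_of_le hp with hp' | hp'
      · rw [← hp', List.getElem?_concat_length] at hread
        obtain ⟨rfl, rfl, rfl⟩ : i = i' ∧ vi = vi' ∧ j = j' := by
          simpa using hread
        exact ⟨hi, hvi1, le_trans hvi hgrow⟩
      · rw [List.getElem?_eq_none
          (by simp only [List.length_append, List.length_cons, List.length_nil]; omega)] at hread
        simp at hread
  · rw [pvGetD_set_ne _ _ _ _ _ (fun h => hkm h.symm)] at hread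
    obtain ⟨a, b, c⟩ := hWF k p i' vi' j' hread
    exact ⟨a, b, le_trans c hgrow⟩

-- one simultaneous write step of the two sweeps
theorem pvWrite_step (target : Int) (ht0 : 0 ≤ target) (i : Nat) (j : Int)
    (table : Array (Option (List Int))) (log : Array (List (Option (Nat × Nat × Int))))
    (hInv : pvInv target table log) (hi : i < (target + 1).toNat)
    (hj : -(target + 1) ≤ j)
    (hSome : (table.toList.getD i none).isSome) :
    pvInv target (pvInnerA target i table j) (pvInnerB target i log j) ∧
    ((pvInnerA target i table j).toList.getD i none).isSome := by
  obtain ⟨h1, h2, hWF, hVal⟩ := hInv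
  by_cases hg : (i : Int) + j ≤ target
  case neg =>
    rw [pvInnerA, pvInnerB, if_neg hg, if_neg hg]
    exact ⟨⟨h1, h2, hWF, hVal⟩, hSome⟩
  case pos =>
  have hn1 : 1 ≤ (target + 1).toNat := by omega
  have hge : -(((target + 1).toNat : Nat) : Int) ≤ (i : Int) + j := by omega
  have hlt : (i : Int) + j < (((target + 1).toNat : Nat) : Int) := by omega
  have hmlt : pvPhys (target + 1).toNat ((i : Int) + j) < (target + 1).toNat :=
    pvPhys_lt _ _ hge hlt
  obtain ⟨li, hli⟩ : ∃ li, table.toList.getD i none = some li :=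
    Option.isSome_iff_exists.mp hSome
  obtain ⟨ri, hri, hlri⟩ : ∃ r, pvBuild log.toList ((log.toList.map List.length).sum) i
      (log.toList.getD i []).length = some r ∧ table.toList.getD i none = some r.reverse := by
    rcases hVal i hi with ⟨hnone, _⟩ | h
    · rw [hli] at hnone; cases hnone
    · exact h
  have hleni : 1 ≤ (log.toList.getD i []).length := by
    have := pvBuild_nonempty hri
    cases h : log.toList.getD i [] with
    | nil => exact absurd h this
    | cons a l => simp
  have hAw : (pvInnerA target i table j).toList =
      table.toList.set (pvPhys (target + 1).toNat ((i : Int) + j)) (some (li ++ [j])) := by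
    rw [pvInnerA, if_pos hg, pvAGet_natCast _ _ _ (by omega), hli,
      pvASet_toList _ _ _ (by omega) (by omega), h1]
    rfl
  have hBw : (pvInnerB target i log j).toList =
      log.toList.set (pvPhys (target + 1).toNat ((i : Int) + j))
        (log.toList.getD (pvPhys (target + 1).toNat ((i : Int) + j)) [] ++
          [some (i, (log.toList.getD i []).length, j)]) := by
    rw [pvInnerB, if_pos hg, pvAGet_natCast log (i : Nat) _ (by omega),
      pvASet_toList _ _ _ (by omega) (by omega),
      pvAGet_eq _ _ _ (by omega) (by omega), h2]
  have hmlen : pvPhys (target + 1).toNat ((i : Int) + j) < log.toList.length := by omega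
  have hmtab : pvPhys (target + 1).toNat ((i : Int) + j) < table.toList.length := by omega
  have hWF' := pvWF_set_append log.toList hWF _ hmlen i (log.toList.getD i []).length j hi
    hleni le_rfl
  have hsum := pvSumLen_set_append log.toList _
    (some (i, (log.toList.getD i []).length, j)) hmlen
  have hstab := pvBuild_set_append log.toList _
    (some (i, (log.toList.getD i []).length, j)) hmlen hWF
  refine ⟨⟨by rw [hAw]; simp [h1], by rw [hBw]; simp [h2], by rw [hBw]; exact hWF', ?_⟩, ?_⟩
  · intro k hk
    rw [hAw, hBw]
    by_cases hkm : k = pvPhys (target + 1).toNat ((i : Int) + j)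
    · subst hkm
      refine Or.inr ⟨j :: ri, ?_, ?_⟩
      · rw [hsum, pvGetD_set_self _ _ _ _ hmlen]
        have hlen' : (log.toList.getD (pvPhys (target + 1).toNat ((i : Int) + j)) [] ++
            [some (i, (log.toList.getD i []).length, j)]).length =
            (log.toList.getD (pvPhys (target + 1).toNat ((i : Int) + j)) []).length + 1 := by
          simp
        rw [hlen', pvBuild, pvGetD_set_self _ _ _ _ hmlen]
        have hcl : (log.toList.getD (pvPhys (target + 1).toNat ((i : Int) + j)) [] ++
            [some (i, (log.toList.getD i []).length, j)])[(log.toList.getD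
              (pvPhys (target + 1).toNat ((i : Int) + j)) []).length + 1 - 1]? =
            some (some (i, (log.toList.getD i []).length, j)) := by
          rw [show (log.toList.getD (pvPhys (target + 1).toNat ((i : Int) + j)) []).length
            + 1 - 1 =
            (log.toList.getD (pvPhys (target + 1).toNat ((i : Int) + j)) []).length from rfl]
          exact List.getElem?_concat_length
        rw [hcl]
        simp only [hstab ((log.toList.map List.length).sum) i
          (log.toList.getD i []).length hleni le_rfl, hri]
        rfl
      · rw [pvGetD_set_self _ _ _ _ hmtab]
        rw [hli] at hlri
        have : li = ri.reverse := by simpa using hlri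
        simp [this]
    · rcases hVal k hk with ⟨htn, hle⟩ | ⟨r, hb, ht⟩
      · refine Or.inl ⟨?_, ?_⟩
        · rw [pvGetD_set_ne _ _ _ _ _ (fun h => hkm h.symm)]; exact htn
        · rw [pvGetD_set_ne _ _ _ _ _ (fun h => hkm h.symm)]; exact hle
      · have hlk : 1 ≤ (log.toList.getD k []).length := by
          have := pvBuild_nonempty hb
          cases h : log.toList.getD k [] with
          | nil => exact absurd h this
          | cons a l => simp
        refine Or.inr ⟨r, ?_, ?_⟩
        · rw [hsum, pvGetD_set_ne _ _ _ _ _ (fun h => hkm h.symm),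
            hstab ((log.toList.map List.length).sum + 1) k
              (log.toList.getD k []).length hlk le_rfl]
          exact pvBuild_mono log.toList _ _ _ _ r (by omega) hb
        · rw [pvGetD_set_ne _ _ _ _ _ (fun h => hkm h.symm)]; exact ht
  · rw [hAw]
    by_cases him : i = pvPhys (target + 1).toNat ((i : Int) + j)
    · rw [← him, pvGetD_set_self _ _ _ _ (by omega)]; rfl
    · rw [pvGetD_set_ne _ _ _ _ _ (fun h => him h.symm), hli]; rfl

theorem pvInner_loop (target : Int) (ht0 : 0 ≤ target) (i : Nat)
    (hi : i < (target + 1).toNat) (js : List Int) (hjs : ∀ j ∈ js, -(target + 1) ≤ j) :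
    ∀ (table : Array (Option (List Int))) (log : Array (List (Option (Nat × Nat × Int)))),
      pvInv target table log → (table.toList.getD i none).isSome →
      pvInv target (js.foldl (pvInnerA target i) table) (js.foldl (pvInnerB target i) log) := by
  induction js with
  | nil => intro table log hInv _; exact hInv
  | cons j js ih =>
    intro table log hInv hSome
    simp only [List.foldl_cons]
    have hstep := pvWrite_step target ht0 i j table log hInv hi (hjs j (by simp)) hSome
    exact ih (fun j' h => hjs j' (by simp [h])) _ _ hstep.1 hstep.2

theorem pvOuter_loop (target : Int) (ht0 : 0 ≤ target) (list : List Int)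
    (hjs : ∀ j ∈ list, -(target + 1) ≤ j) :
    ∀ (len s : Nat) (table : Array (Option (List Int)))
      (log : Array (List (Option (Nat × Nat × Int)))),
      s + len ≤ (target + 1).toNat →
      pvInv target table log →
      pvInv target ((List.range' s len).foldl (pvOuterA target list) table)
        ((List.range' s len).foldl (pvOuterB target list) log) := by
  intro len
  induction len with
  | zero => intro s table log _ h; simpa using h
  | succ len ih =>
    intro s table log hsl hInv
    rw [List.range'_succ]
    simp only [List.foldl_cons]
    have hsn : s < (target + 1).toNat := by omega
    obtain ⟨h1, h2, hWF, hVal⟩ := hInv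
    have hAg : pvAGet table (s : Int) none = table.toList.getD s none :=
      pvAGet_natCast _ _ _ (by omega)
    have hBg : pvAGet log (s : Int) [] = log.toList.getD s [] :=
      pvAGet_natCast _ _ _ (by omega)
    rcases hVal s hsn with ⟨htn, hle⟩ | ⟨r, hb, ht⟩
    · -- cell s unreachable: both loops skip
      have hA : pvOuterA target list table s = table := by
        rw [pvOuterA, hAg, htn, if_neg (by simp)]
      have hB : pvOuterB target list log s = log := by
        rw [pvOuterB, hBg, hle, if_pos (by simp)]
      rw [hA, hB]
      exact ih (s + 1) _ _ (by omega) ⟨h1, h2, hWF, hVal⟩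
    · -- cell s reachable: both run the inner loop
      have hA : pvOuterA target list table s = list.foldl (pvInnerA target s) table := by
        rw [pvOuterA, hAg, ht, if_pos (by simp)]
      have hB : pvOuterB target list log s = list.foldl (pvInnerB target s) log := by
        have hne : log.toList.getD s [] ≠ [] := pvBuild_nonempty hb
        rw [pvOuterB, hBg, if_neg (by simpa [List.isEmpty_iff] using hne)]
      rw [hA, hB]
      have hstep := pvInner_loop target ht0 s hsn list hjs table log ⟨h1, h2, hWF, hVal⟩
        (by rw [ht]; rfl)
      exact ih (s + 1) _ _ (by omega) hstep

-- ===== VERDICT (by name: the statement is the Claim_ definition above) =====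
theorem howsum_wdp_tabular_spec : Claim_equal_howsum_wdp_tabular := by
  intro target list _ hPre
  obtain ⟨ht0, hjs⟩ := hPre
  have hn1 : 1 ≤ (target + 1).toNat := by omega
  have hT0 : (pvASet (Array.replicate (target + 1).toNat (none : Option (List Int))) 0
      (some [])).toList = (List.replicate (target + 1).toNat
        (none : Option (List Int))).set 0 (some []) := by
    rw [pvASet_toList _ _ _ (by simp only [Array.toList_replicate, List.length_replicate]; omega)
      (by simp only [Array.toList_replicate, List.length_replicate]; omega)]
    simp [Array.toList_replicate, pvPhys]
  have hL0 : (pvASet (Array.replicate (target + 1).toNat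
      ([] : List (Option (Nat × Nat × Int)))) 0 [none]).toList =
      (List.replicate (target + 1).toNat ([] : List (Option (Nat × Nat × Int)))).set 0
        [none] := by
    rw [pvASet_toList _ _ _ (by simp only [Array.toList_replicate, List.length_replicate]; omega)
      (by simp only [Array.toList_replicate, List.length_replicate]; omega)]
    simp [Array.toList_replicate, pvPhys]
  have hInv0 : pvInv target
      (pvASet (Array.replicate (target + 1).toNat (none : Option (List Int))) 0 (some []))
      (pvASet (Array.replicate (target + 1).toNat
        ([] : List (Option (Nat × Nat × Int)))) 0 [none]) := by
    rw [pvInv, hT0, hL0]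
    refine ⟨by simp, by simp, ?_, ?_⟩
    · intro k p i vi j hread
      by_cases hk0 : k = 0
      · subst hk0
        rw [pvGetD_set_self _ _ _ _ (by simp; omega)] at hread
        rcases p with _ | p <;> simp at hread
      · rw [pvGetD_set_ne _ _ _ _ _ (fun h => hk0 h.symm), pvGetD_replicate] at hread
        split_ifs at hread <;> simp at hread
    · intro k hk
      by_cases hk0 : k = 0
      · subst hk0
        refine Or.inr ⟨[], ?_, ?_⟩
        · have hsum : (((List.replicate (target + 1).toNat
              ([] : List (Option (Nat × Nat × Int)))).set 0
                [none]).map List.length).sum ≥ 1 := by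
            cases hrep : (target + 1).toNat with
            | zero => omega
            | succ n => simp [List.replicate_succ]
          have hb1 : pvBuild ((List.replicate (target + 1).toNat
              ([] : List (Option (Nat × Nat × Int)))).set 0 [none]) 1 0 1 = some [] := by
            rw [show (1 : Nat) = 0 + 1 from rfl, pvBuild,
              pvGetD_set_self _ _ _ _ (by simp; omega)]
            rfl
          rw [pvGetD_set_self _ _ _ _ (by simp; omega)]
          simp only [List.length_cons, List.length_nil]
          exact pvBuild_mono _ 1 _ 0 1 [] hsum hb1
        · rw [pvGetD_set_self _ _ _ _ (by simp; omega)]; rfl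
      · refine Or.inl ⟨?_, ?_⟩
        · rw [pvGetD_set_ne _ _ _ _ _ (fun h => hk0 h.symm), pvGetD_replicate, if_pos hk]
        · rw [pvGetD_set_ne _ _ _ _ _ (fun h => hk0 h.symm), pvGetD_replicate, if_pos hk]
  have hInvF := pvOuter_loop target ht0 list hjs (target + 1).toNat 0 _ _ (by omega) hInv0
  rw [← List.range_eq_range'] at hInvF
  rw [show ((List.range (target + 1).toNat).foldl (pvOuterB target list)
      (pvASet (Array.replicate (target + 1).toNat
        ([] : List (Option (Nat × Nat × Int)))) 0 [none])) = pvLog target list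
      from rfl] at hInvF
  obtain ⟨h1, h2, hWF, hVal⟩ := hInvF
  have htlt : target.toNat < (target + 1).toNat := by omega
  unfold Spec_howsum_wdp_tabular howsum_wdp_tabular howsum_wdp_tabular_alt
  rw [if_neg (by omega), if_neg (by omega)]
  rw [pvAGet_of_nonneg _ _ _ ht0 (by omega), pvAGet_of_nonneg _ _ _ ht0 (by omega)]
  rcases hVal target.toNat htlt with ⟨htn, hle⟩ | ⟨r, hb, ht⟩
  · rw [htn, hle, if_pos (by simp)]
  · have hne : (pvLog target list).toList.getD target.toNat [] ≠ [] := pvBuild_nonempty hb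
    rw [ht, if_neg (by simpa [List.isEmpty_iff] using hne), pvFuel_eq,
      pvBuildA_eq _ _ _ _ [] r hb]
    rfl
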